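-- pv_equiv track=rewrite | github.com/itrummer/dbz | libraries/row_lists.py | group_by_min
-- ===== SOURCE A (Python) =====
-- def group_by_min(table, agg_column, group_columns):
--     """ Calculate min for each value combination in group columns.
--
--     Args:
--         table: a list of rows where each row is a list.
--         agg_column: index of column for which to calculate min.
--         group_columns: indexes of columns to group by.
--
--     Returns:
--         group columns and associated min: a list of rows where each row is a list.
--     """
--     # create a dictionary to store the groups
--     groups = {}
--     # for each row in the table
--     for row in table:
--         # create a key for the dictionary
--         key = tuple([row[i] for i in group_columns])
--         # if the key is not in the dictionary
--         if key not in groups: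
--             # add the key and set the value to the row
--             groups[key] = row
--         # if the key is in the dictionary
--         else:
--             # if the value in the row is less than the value in the dictionary
--             if row[agg_column] < groups[key][agg_column]:
--                 # set the value in the dictionary to the row
--                 groups[key] = row
--     # create a list to store the results
--     results = []
--     # for each key in the dictionary
--     for key in groups:
--         # add the value to the list
--         results.append(groups[key])
--     # return the list
--     return results
-- ===== SOURCE B (Python) =====
-- def group_by_min(table, agg_column, group_columns):
--     """ Calculate min for each value combination in group columns. """
--     # gather ALL rows of each group (no comparison in this pass)
--     groups = {}
--     for row in table:
--         groups.setdefault(tuple(row[i] for i in group_columns), []).append(row)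
--     # pick each group's representative with min (same '<' / first-on-tie semantics)
--     return [min(rows, key=lambda r: r[agg_column]) for rows in groups.values()]
-- ===== Notes on version B (the rewrite author's own statement) =====
-- stated objective: idiomatic
-- what changed: Pass 1 only appends each row to its group's list (no comparison at all); selection happens afterwards with a separate min(rows, key=...) reduction per group, replacing A's maintained best-row and its compare-and-replace branch.
-- outside the precondition, e.g. on group_by_min([[1]], 5, [0]): A returns [[1]], B raises IndexError
import Mathlib
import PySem

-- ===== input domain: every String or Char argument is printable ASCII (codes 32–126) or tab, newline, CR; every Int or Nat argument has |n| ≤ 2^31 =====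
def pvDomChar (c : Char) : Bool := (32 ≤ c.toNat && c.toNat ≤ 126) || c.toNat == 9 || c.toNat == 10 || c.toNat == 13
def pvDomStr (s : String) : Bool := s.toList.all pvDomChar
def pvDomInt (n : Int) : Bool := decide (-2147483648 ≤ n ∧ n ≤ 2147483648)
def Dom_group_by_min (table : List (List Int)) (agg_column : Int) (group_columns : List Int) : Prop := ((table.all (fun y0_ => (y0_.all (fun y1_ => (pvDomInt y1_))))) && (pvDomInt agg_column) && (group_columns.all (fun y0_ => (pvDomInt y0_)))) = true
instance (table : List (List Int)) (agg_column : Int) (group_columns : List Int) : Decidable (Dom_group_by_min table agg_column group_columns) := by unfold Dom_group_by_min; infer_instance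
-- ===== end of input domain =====

-- B keeps ALL rows of each group in a first appending pass and selects each
-- group's representative afterwards with a min-by-key reduction (idiomatic;
-- same cost); A maintains a running best row with a compare-and-replace branch.

-- ===== PORT A =====
-- key = tuple([row[i] for i in group_columns]); Pre_ guarantees every index is in range
def pvKey (group_columns : List Int) (row : List Int) : List Int :=
  group_columns.map (fun i => PySem.List.pyGetD row i 0)

-- one iteration of A's grouping loop
def pvAStep (agg_column : Int) (group_columns : List Int)
    (groups : PySem.Dict (List Int) (List Int)) (row : List Int) :
    PySem.Dict (List Int) (List Int) :=
  let key := pvKey group_columns row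
  if groups.contains key then
    if PySem.List.pyGetD row agg_column 0 < PySem.List.pyGetD (groups.getD key []) agg_column 0 then
      groups.insert key row
    else groups
  else groups.insert key row

def group_by_min (table : List (List Int)) (agg_column : Int) (group_columns : List Int) : List (List Int) :=
  let groups := table.foldl (pvAStep agg_column group_columns) PySem.Dict.empty
  -- for key in groups: results.append(groups[key])
  groups.keys.foldl (fun results key => results ++ [groups.getD key []]) []

-- ===== PORT B =====
-- one iteration of B's appending pass: groups.setdefault(key, []).append(row)
def pvBStep (group_columns : List Int)
    (groups : PySem.Dict (List Int) (List (List Int))) (row : List Int) :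
    PySem.Dict (List Int) (List (List Int)) :=
  groups.modify (pvKey group_columns row) [] (fun rows => rows ++ [row])

def group_by_min_alt (table : List (List Int)) (agg_column : Int) (group_columns : List Int) : List (List Int) :=
  let groups := table.foldl (pvBStep group_columns) PySem.Dict.empty
  -- [min(rows, key=lambda r: r[agg_column]) for rows in groups.values()]
  groups.values.map (fun rows =>
    (PySem.List.min? rows (fun r => PySem.List.pyGetD r agg_column 0)).getD [])

-- ===== PRECONDITION & SPEC =====
-- Pre_ excludes inputs where some used index (agg_column, or an index in
-- group_columns) is out of range for some row: there A raises IndexError as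
-- soon as the index is dereferenced, and on the residual cases (all group keys
-- distinct, so A never reads agg_column) A's returned value is accidental
-- while B reads agg_column in every group and raises.
def Pre_group_by_min (table : List (List Int)) (agg_column : Int) (group_columns : List Int) : Prop :=
  ∀ row ∈ table, PySem.Raise.InRange row.length agg_column ∧
    ∀ i ∈ group_columns, PySem.Raise.InRange row.length i
instance (table : List (List Int)) (agg_column : Int) (group_columns : List Int) : Decidable (Pre_group_by_min table agg_column group_columns) := by unfold Pre_group_by_min; infer_instance

def pvWitness_group_by_min : List (List Int) × Int × List Int := ([[1, 2], [1, 3], [2, 0]], 1, [0])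

def Spec_group_by_min (table : List (List Int)) (agg_column : Int) (group_columns : List Int) (out : List (List Int)) : Prop := out = group_by_min_alt table agg_column group_columns
instance (table : List (List Int)) (agg_column : Int) (group_columns : List Int) (out : List (List Int)) : Decidable (Spec_group_by_min table agg_column group_columns out) := by unfold Spec_group_by_min; infer_instance

-- ===== CLAIM (what is proved, stated in full; the proofs are below) =====
def Claim_equal_group_by_min : Prop := ∀ (table : List (List Int)) (agg_column : Int) (group_columns : List Int), Dom_group_by_min table agg_column group_columns → Pre_group_by_min table agg_column group_columns → Spec_group_by_min table agg_column group_columns (group_by_min table agg_column group_columns)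

-- ===== LEMMAS AND PROOFS =====

-- one more row appended to a group = one more step of min's fold
theorem pv_min?_append_singleton {α κ : Type} [LT κ] [DecidableLT κ]
    (xs : List α) (key : α → κ) (x : α) :
    PySem.List.min? (xs ++ [x]) key =
      match PySem.List.min? xs key with
      | none => some x
      | some m => if key x < key m then some x else some m := by
  unfold PySem.List.min?
  rw [List.foldl_append]
  rfl

-- The invariant tying A's dict (key → current best row) to B's dict
-- (key → all rows so far): same keys in the same order, keys without
-- duplicates, and A's entry is the min-by-agg of B's row list.
theorem pv_inv (agg_column : Int) (group_columns : List Int) (l : List (List Int)) :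
    ∀ (gA : PySem.Dict (List Int) (List Int)) (gB : PySem.Dict (List Int) (List (List Int))),
      gA.keys = gB.keys → gB.keys.Nodup →
      (∀ k, gA.get? k =
        PySem.List.min? (gB.getD k []) (fun r => PySem.List.pyGetD r agg_column 0)) →
      ((l.foldl (pvAStep agg_column group_columns) gA).keys
          = (l.foldl (pvBStep group_columns) gB).keys ∧
       (l.foldl (pvBStep group_columns) gB).keys.Nodup ∧
       ∀ k, (l.foldl (pvAStep agg_column group_columns) gA).get? k =
        PySem.List.min? ((l.foldl (pvBStep group_columns) gB).getD k [])
          (fun r => PySem.List.pyGetD r agg_column 0)) := by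
  induction l with
  | nil => intro gA gB h1 h2 h3; exact ⟨h1, h2, h3⟩
  | cons row t ih =>
    intro gA gB hkeys hnd hget
    simp only [List.foldl_cons]
    set k0 := pvKey group_columns row with hk0
    have hcontains : gA.contains k0 = gB.contains k0 := by
      rw [PySem.Dict.contains_eq_decide_mem_keys, PySem.Dict.contains_eq_decide_mem_keys, hkeys]
    by_cases hc : gB.contains k0 = true
    · -- key already present: A compares, B appends
      have hcA : gA.contains k0 = true := by rw [hcontains]; exact hc
      -- B's list at k0 is nonempty, with min 'best' = A's entry
      obtain ⟨best, hbest⟩ : ∃ b, gA.get? k0 = some b := by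
        have := PySem.Dict.contains_eq_isSome_get? gA k0
        rw [hcA] at this
        exact Option.isSome_iff_exists.mp this.symm
      have hmin : PySem.List.min? (gB.getD k0 [])
          (fun r => PySem.List.pyGetD r agg_column 0) = some best := by
        rw [← hget, hbest]
      -- keys of both steps are unchanged
      have hkB : (pvBStep group_columns gB row).keys = gB.keys := by
        unfold pvBStep
        rw [← hk0, PySem.Dict.keys_modify, PySem.Dict.keys_insert_of_contains _ _ hc]
      have hkA : (pvAStep agg_column group_columns gA row).keys = gA.keys := by
        unfold pvAStep
        rw [← hk0]
        simp only [hcA, if_true]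
        split
        · exact PySem.Dict.keys_insert_of_contains _ _ hcA
        · rfl
      apply ih
      · rw [hkA, hkB, hkeys]
      · rw [hkB]; exact hnd
      · intro k
        have hgDB : (pvBStep group_columns gB row).getD k [] =
            if k = k0 then gB.getD k0 [] ++ [row] else gB.getD k [] := by
          unfold pvBStep
          rw [← hk0, PySem.Dict.getD_modify]
        by_cases hk : k = k0
        · subst hk
          rw [hgDB]
          simp only [if_true]
          -- min over rows ++ [row] = one more fold step from 'best'
          have hsplit : PySem.List.min? (gB.getD k0 [] ++ [row])
              (fun r => PySem.List.pyGetD r agg_column 0) =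
              if PySem.List.pyGetD row agg_column 0 < PySem.List.pyGetD best agg_column 0
                then some row else some best := by
            rw [pv_min?_append_singleton, hmin]
          rw [hsplit]
          have hbestD : gA.getD k0 [] = best := by
            rw [PySem.Dict.getD_eq_get?_getD, hbest]; rfl
          unfold pvAStep
          rw [← hk0]
          simp only [hcA, if_true, hbestD]
          split
          · rw [PySem.Dict.get?_insert]; simp
          · rw [hbest]
        · rw [hgDB, if_neg hk]
          have : (pvAStep agg_column group_columns gA row).get? k = gA.get? k := by
            unfold pvAStep
            rw [← hk0]
            simp only [hcA, if_true]
            split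
            · rw [PySem.Dict.get?_insert, if_neg hk]
            · rfl
          rw [this, hget]
      -- key is new: A inserts the row, B starts the list [row]
    · have hc' : gB.contains k0 = false := by
        cases h : gB.contains k0 with
        | false => rfl
        | true => exact absurd h hc
      have hcA : gA.contains k0 = false := by rw [hcontains]; exact hc'
      have hB0 : gB.getD k0 [] = [] :=
        PySem.Dict.getD_of_not_contains gB [] hc'
      have hkB : (pvBStep group_columns gB row).keys = gB.keys ++ [k0] := by
        unfold pvBStep
        rw [← hk0, PySem.Dict.keys_modify, PySem.Dict.keys_insert_of_not_contains _ _ hc']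
      have hstepA : pvAStep agg_column group_columns gA row = gA.insert k0 row := by
        unfold pvAStep
        rw [← hk0]
        simp [hcA]
      apply ih
      · rw [hstepA, hkB, PySem.Dict.keys_insert_of_not_contains _ _ hcA, hkeys]
      · rw [hkB]
        refine List.nodup_append.mpr ⟨hnd, List.nodup_singleton _, ?_⟩
        intro a ha b hb
        rw [List.mem_singleton] at hb
        subst hb
        intro heq
        subst heq
        exact hc ((PySem.Dict.contains_iff_mem_keys gB _).mpr ha)
      · intro k
        have hgDB : (pvBStep group_columns gB row).getD k [] =
            if k = k0 then gB.getD k0 [] ++ [row] else gB.getD k [] := by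
          unfold pvBStep
          rw [← hk0, PySem.Dict.getD_modify]
        rw [hstepA, PySem.Dict.get?_insert, hgDB]
        by_cases hk : k = k0
        · subst hk
          simp only [if_true, hB0, List.nil_append]
          rfl
        · rw [if_neg hk, if_neg hk, hget]

-- the final reading-out step, stated over the two finished dicts
theorem pv_final (agg_column : Int)
    (gA : PySem.Dict (List Int) (List Int)) (gB : PySem.Dict (List Int) (List (List Int)))
    (hkeys : gA.keys = gB.keys) (hnd : gB.keys.Nodup)
    (hget : ∀ k, gA.get? k =
      PySem.List.min? (gB.getD k []) (fun r => PySem.List.pyGetD r agg_column 0)) :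
    gA.keys.foldl (fun results key => results ++ [gA.getD key []]) [] =
      gB.values.map (fun rows =>
        (PySem.List.min? rows (fun r => PySem.List.pyGetD r agg_column 0)).getD []) := by
  rw [PySem.List.foldl_append_singleton_eq_map, List.nil_append,
    PySem.Dict.values_eq_map_keys gB hnd [], List.map_map, ← hkeys]
  apply List.map_congr_left
  intro k _
  simp only [Function.comp]
  rw [PySem.Dict.getD_eq_get?_getD, hget k]

-- ===== VERDICT (by name: the statement is the Claim_ definition above) =====
theorem group_by_min_spec : Claim_equal_group_by_min := by
  intro table agg_column group_columns _ _
  obtain ⟨hkeys, hnd, hget⟩ :=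
    pv_inv agg_column group_columns table PySem.Dict.empty PySem.Dict.empty
      rfl (by rw [PySem.Dict.keys_empty]; exact List.nodup_nil)
      (by intro k; rw [PySem.Dict.get?_empty, PySem.Dict.getD_empty]; rfl)
  unfold Spec_group_by_min group_by_min group_by_min_alt
  exact pv_final agg_column _ _ hkeys hnd hget
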